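-- pv_equiv track=rewrite | github.com/aNGaN1os/ergasies_python | project 4.py | Last2Words
-- ===== SOURCE A (Python) =====
-- def Last2Words(x):
--     i=-1
--     wordNum=1
--     while (wordNum!=3):
--         if (x[i]==" " and wordNum==1):
--             wordNum=2
--         elif (x[i]==" " and wordNum==2):
--             wordNum=3
--         i-=1
--     return x[i+2:]
-- ===== SOURCE B (Python) =====
-- def Last2Words(x):
--     spaces = [i for i, c in enumerate(x) if c == " "]
--     return x[spaces[-2] + 1:]
-- ===== Notes on version B (the rewrite author's own statement) =====
-- stated objective: simpler
-- what changed: B replaces A's backward character-by-character scan with a mutable word counter by a single forward pass that collects all space indices and slices the string after the second-to-last one (spaces[-2]+1).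
import Mathlib
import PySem

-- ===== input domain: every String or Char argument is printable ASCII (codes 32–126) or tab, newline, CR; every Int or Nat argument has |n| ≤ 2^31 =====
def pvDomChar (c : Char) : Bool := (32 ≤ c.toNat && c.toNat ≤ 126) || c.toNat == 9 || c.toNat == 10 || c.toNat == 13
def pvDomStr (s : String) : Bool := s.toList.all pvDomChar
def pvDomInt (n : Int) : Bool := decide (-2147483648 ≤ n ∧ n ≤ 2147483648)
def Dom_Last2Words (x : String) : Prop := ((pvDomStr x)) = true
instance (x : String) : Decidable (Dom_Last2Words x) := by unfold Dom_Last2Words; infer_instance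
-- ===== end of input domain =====

-- B builds the list of space indices in one forward pass and slices after the
-- second-to-last one, instead of A's backward scan with a word counter (objective: simpler).

-- ===== PORT A =====
-- A's while loop: i walks backward from -1, wordNum counts spaces seen.
-- Fuel bounds the loop; with fuel = len+1 the loop either finds the second space
-- (returns x[i+2:]) or x[i] raises IndexError (pyGet? = none; outside Pre_, "" is returned).
def Last2WordsLoop (x : String) (i : Int) (wordNum : Int) : Nat → String
  | 0 => ""  -- unreachable with fuel = len+1: Python would have raised by now
  | fuel+1 =>
    match PySem.Str.pyGet? x i with
    | none => ""  -- IndexError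
    | some c =>
      if c = ' ' ∧ wordNum = 1 then Last2WordsLoop x (i-1) 2 fuel
      else if c = ' ' ∧ wordNum = 2 then
        -- wordNum becomes 3, i -= 1, loop exits, return x[i+2:] = x[(i-1)+2:]
        PySem.Str.slice x (some (i+1)) none
      else Last2WordsLoop x (i-1) wordNum fuel

def Last2Words (x : String) : String :=
  Last2WordsLoop x (-1) 1 (x.toList.length + 1)

-- ===== PORT B =====
def Last2Words_alt (x : String) : String :=
  let spaces := ((PySem.List.enumerate x.toList).filter (fun p => p.2 = ' ')).map (·.1)
  match PySem.List.pyGet? spaces (-2) with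
  | none => ""  -- IndexError
  | some j => PySem.Str.slice x (some (j+1)) none

-- ===== PRECONDITION & SPEC =====
-- Pre_: the string contains at least two spaces; with fewer, both A's backward
-- walk off the front and B's spaces[-2] raise IndexError.
def Pre_Last2Words (x : String) : Prop := 2 ≤ x.toList.count ' '
instance (x : String) : Decidable (Pre_Last2Words x) := by unfold Pre_Last2Words; infer_instance

def pvWitness_Last2Words : String := "one two three"

def Spec_Last2Words (x : String) (out : String) : Prop := out = Last2Words_alt x
instance (x : String) (out : String) : Decidable (Spec_Last2Words x out) := by unfold Spec_Last2Words; infer_instance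

-- ===== CLAIM (what is proved, stated in full; the proofs are below) =====
def Claim_equal_Last2Words : Prop := ∀ (x : String), Dom_Last2Words x → Pre_Last2Words x → Spec_Last2Words x (Last2Words x)

-- ===== LEMMAS AND PROOFS =====

-- indices (ascending) of the spaces in a char list
def sIdx : List Char → List Nat
  | [] => []
  | c :: cs => if c = ' ' then 0 :: (sIdx cs).map (· + 1) else (sIdx cs).map (· + 1)

-- forward scan of the REVERSED string: position of the second space (w=1) / next space (w=2)
def scanR : List Char → Int → Option Nat
  | [], _ => none
  | c :: cs, w =>
    if c = ' ' ∧ w = 1 then (scanR cs 2).map (· + 1)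
    else if c = ' ' ∧ w = 2 then some 0
    else (scanR cs w).map (· + 1)

theorem length_sIdx (l : List Char) : (sIdx l).length = l.count ' ' := by
  induction l with
  | nil => simp [sIdx]
  | cons c cs ih =>
    by_cases h : c = ' ' <;> simp [sIdx, h, ih]

theorem sIdx_lt (l : List Char) : ∀ j ∈ sIdx l, j < l.length := by
  induction l with
  | nil => simp [sIdx]
  | cons c cs ih =>
    intro j hj
    simp only [sIdx] at hj
    split_ifs at hj <;> simp only [List.mem_cons, List.mem_map] at hj
    · rcases hj with rfl | ⟨a, ha, rfl⟩
      · simp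
      · have := ih a ha; simp only [List.length_cons]; omega
    · rcases hj with ⟨a, ha, rfl⟩
      have := ih a ha; simp only [List.length_cons]; omega

theorem sIdx_pairwise (l : List Char) : (sIdx l).Pairwise (· < ·) := by
  induction l with
  | nil => simp [sIdx]
  | cons c cs ih =>
    have hm : ((sIdx cs).map (· + 1)).Pairwise (· < ·) :=
      (List.pairwise_map).2 (ih.imp (fun h => by omega))
    by_cases h : c = ' '
    · rw [sIdx, if_pos h]
      refine List.Pairwise.cons (fun a ha => ?_) hm
      obtain ⟨b, _, rfl⟩ := List.mem_map.1 ha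
      omega
    · rw [sIdx, if_neg h]
      exact hm

theorem sIdx_append (l : List Char) (c : Char) :
    sIdx (l ++ [c]) = sIdx l ++ (if c = ' ' then [l.length] else []) := by
  induction l with
  | nil => by_cases h : c = ' ' <;> simp [sIdx, h]
  | cons d ds ih =>
    by_cases h : c = ' '
    · subst h
      by_cases hd : d = ' ' <;> simp [sIdx, hd, ih]
    · by_cases hd : d = ' ' <;> simp [sIdx, hd, h, ih]

theorem sIdx_reverse (l : List Char) :
    sIdx l.reverse = (sIdx l).reverse.map (fun j => l.length - 1 - j) := by
  induction l using List.reverseRecOn with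
  | nil => simp [sIdx]
  | append_singleton ys c ih =>
    rw [List.reverse_append, List.reverse_singleton, List.singleton_append, sIdx_append]
    by_cases h : c = ' '
    · subst h
      have e1 : sIdx (' ' :: ys.reverse) = 0 :: (sIdx ys.reverse).map (· + 1) := by
        simp [sIdx]
      rw [e1, ih, if_pos rfl, List.reverse_append, List.reverse_singleton,
        List.singleton_append, List.map_cons, List.map_map]
      refine congrArg₂ List.cons ?_ ?_
      · simp
      · apply List.map_congr_left
        intro j hj
        have hlt : j < ys.length := sIdx_lt ys j (List.mem_reverse.1 hj)
        simp only [Function.comp_apply, List.length_append, List.length_cons,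
          List.length_nil]
        omega
    · have e1 : sIdx (c :: ys.reverse) = (sIdx ys.reverse).map (· + 1) := by
        simp [sIdx, h]
      rw [e1, ih, if_neg h, List.append_nil, List.map_map]
      apply List.map_congr_left
      intro j hj
      have hlt : j < ys.length := sIdx_lt ys j (List.mem_reverse.1 hj)
      simp only [Function.comp_apply, List.length_append, List.length_cons,
        List.length_nil]
      omega

theorem scanR_eq (r : List Char) :
    scanR r 1 = (sIdx r)[1]? ∧ scanR r 2 = (sIdx r)[0]? := by
  induction r with
  | nil => simp [scanR, sIdx]
  | cons c cs ih =>
    refine ⟨?_, ?_⟩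
    · by_cases h : c = ' '
      · rw [scanR, if_pos ⟨h, rfl⟩, ih.2]
        simp [sIdx, h, List.getElem?_map]
      · rw [scanR, if_neg (by simp [h]), if_neg (by simp [h]), ih.1]
        simp [sIdx, h, List.getElem?_map]
    · by_cases h : c = ' '
      · rw [scanR, if_neg (by simp), if_pos ⟨h, rfl⟩]
        simp [sIdx, h]
      · rw [scanR, if_neg (by simp [h]), if_neg (by simp [h]), ih.2]
        simp [sIdx, h, List.getElem?_map]

-- the filtered enumerate of B equals sIdx, shifted by the start index
theorem enumerate_filter_eq (l : List Char) (s : Int) :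
    ((PySem.List.enumerate l s).filter (fun p => p.2 = ' ')).map (·.1)
      = (sIdx l).map (fun (j : Nat) => s + (j : Int)) := by
  induction l generalizing s with
  | nil => simp [sIdx]
  | cons c cs ih =>
    rw [PySem.List.enumerate_cons]
    by_cases h : c = ' '
    · rw [List.filter_cons_of_pos (by simp [h]), List.map_cons, ih]
      subst h
      simp only [sIdx]
      refine congrArg₂ _ (by ring) ?_
      rw [List.map_map]
      apply List.map_congr_left
      intro j _
      simp only [Function.comp_apply]
      push_cast
      ring
    · rw [List.filter_cons_of_neg (by simp [h]), ih]
      simp only [sIdx, if_neg h, List.map_map]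
      apply List.map_congr_left
      intro j _
      simp only [Function.comp_apply]
      push_cast
      ring

-- the loop of A, started at i = -1-k, is the scan of the reversed string from position k
theorem loopA_eq (x : String) (fuel : Nat) :
    ∀ (k : Nat) (w : Int), x.toList.length - k ≤ fuel →
    Last2WordsLoop x (-1 - (k : Int)) w fuel =
      match scanR (x.toList.reverse.drop k) w with
      | none => ""
      | some m => PySem.Str.slice x (some (-(((k + m : Nat)) : Int))) none := by
  induction fuel with
  | zero =>
    intro k w hf
    have hdrop : x.toList.reverse.drop k = [] := by
      apply List.drop_eq_nil_of_le; rw [List.length_reverse]; omega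
    simp [Last2WordsLoop, hdrop, scanR]
  | succ fuel ih =>
    intro k w hf
    have hxl : x.toList.length = x.length := by simp
    by_cases hk : k < x.toList.length
    · -- current char exists: it is (reverse l)[k] = l[n-(k+1)]
      have hj : x.toList.length - (k+1) < x.toList.length := by omega
      set c := x.toList[x.toList.length - (k+1)]'hj with hc
      have hkr : k < x.toList.reverse.length := by simpa using hk
      have hget : PySem.List.pyGet? x.toList (-1 - (k : Int)) = some c := by
        have h1 : (-1 - (k : Int)) = -(((k+1 : Nat)) : Int) := by push_cast; ring
        rw [h1, PySem.List.pyGet?_neg_natCast _ _ (by omega) (by omega)]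
        exact List.getElem?_eq_getElem hj
      have hrev : x.toList.reverse[k]'hkr = c := by
        rw [List.getElem_reverse]
        congr 1
        omega
      have hdrop : x.toList.reverse.drop k = c :: x.toList.reverse.drop (k+1) := by
        rw [List.drop_eq_getElem_cons hkr, hrev]
      rw [Last2WordsLoop]
      simp only [PySem.Str.pyGet?, PySem.Chars.pyGet?, hget]
      by_cases h1 : c = ' ' ∧ w = 1
      · rw [if_pos h1]
        have harg : -1 - (k : Int) - 1 = -1 - ((k+1 : Nat) : Int) := by push_cast; ring
        rw [harg, ih (k+1) 2 (by omega), hdrop]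
        rw [scanR, if_pos h1]
        cases hs : scanR (x.toList.reverse.drop (k+1)) 2 with
        | none => simp
        | some m => simp only [Option.map_some]; congr 2; omega
      · rw [if_neg h1]
        by_cases h2 : c = ' ' ∧ w = 2
        · rw [if_pos h2, hdrop, scanR,
            if_neg (by rintro ⟨_, hw⟩; exact h1 ⟨h2.1, hw⟩), if_pos h2]
          congr 2
          push_cast
          ring
        · rw [if_neg h2]
          have harg : -1 - (k : Int) - 1 = -1 - ((k+1 : Nat) : Int) := by push_cast; ring
          rw [harg, ih (k+1) w (by omega), hdrop, scanR,
            if_neg h1, if_neg h2]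
          cases hs : scanR (x.toList.reverse.drop (k+1)) w with
          | none => simp
          | some m => simp only [Option.map_some]; congr 2; omega
    · have hdrop : x.toList.reverse.drop k = [] := by
        apply List.drop_eq_nil_of_le; rw [List.length_reverse]; omega
      have hget : PySem.List.pyGet? x.toList (-1 - (k : Int)) = none := by
        rw [PySem.List.pyGet?_eq_none_iff]
        simp only [PySem.Raise.InRange]
        omega
      rw [Last2WordsLoop]
      simp only [PySem.Str.pyGet?, PySem.Chars.pyGet?, hget, hdrop, scanR]

-- ===== VERDICT (by name: the statement is the Claim_ definition above) =====
theorem Last2Words_spec : Claim_equal_Last2Words := by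
  intro x _ hpre
  unfold Spec_Last2Words Last2Words Last2Words_alt
  set l := x.toList with hl
  set s := sIdx l with hs
  have hL : 2 ≤ s.length := by rw [hs, length_sIdx]; exact hpre
  have hL2 : s.length - 2 < s.length := by omega
  set j := s[s.length - 2]'hL2 with hjdef
  have hjmem : j ∈ s := List.getElem_mem hL2
  have hjn : j < l.length := sIdx_lt l j hjmem
  have hL1 : s.length - 1 < s.length := by omega
  have hjlast : j < s[s.length - 1]'hL1 := by
    have := (List.pairwise_iff_getElem.1 (sIdx_pairwise l)) (s.length - 2) (s.length - 1)
      hL2 hL1 (by omega)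
    exact this
  have hlastn : s[s.length - 1]'hL1 < l.length :=
    sIdx_lt l _ (List.getElem_mem hL1)
  -- A's side
  have hA : Last2WordsLoop x (-1) 1 (l.length + 1)
      = PySem.Str.slice x (some (-((l.length - 1 - j : Nat) : Int))) none := by
    have h0 : (-1 : Int) = -1 - ((0 : Nat) : Int) := by norm_num
    rw [h0, loopA_eq x (l.length + 1) 0 1 (by rw [← hl]; omega), List.drop_zero]
    have hrevlen : sIdx l.reverse = (s.reverse).map (fun j => l.length - 1 - j) := by
      rw [sIdx_reverse, hs]
    have hscan : scanR l.reverse 1 = some (l.length - 1 - j) := by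
      have h1s : 1 < s.length := by omega
      rw [(scanR_eq l.reverse).1, hrevlen, List.getElem?_map,
        List.getElem?_reverse h1s]
      have e2 : s.length - 1 - 1 = s.length - 2 := by omega
      rw [e2, List.getElem?_eq_getElem hL2, ← hjdef]
      rfl
    rw [hscan]
    simp only [Nat.zero_add]
  rw [hA]
  -- B's side
  have hsp : ((PySem.List.enumerate l).filter (fun p => p.2 = ' ')).map (·.1)
      = s.map (fun (j : Nat) => (0 : Int) + (j : Int)) := by
    rw [enumerate_filter_eq l 0, hs]
  simp only [hsp]
  have hget2 : PySem.List.pyGet? (s.map (fun (j : Nat) => (0 : Int) + (j : Int))) (-2)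
      = some ((0 : Int) + (j : Int)) := by
    rw [show (-2 : Int) = -((2 : Nat) : Int) by norm_num,
      PySem.List.pyGet?_neg_natCast _ _ (by omega) (by simp; omega)]
    rw [List.getElem?_map, List.length_map]
    rw [List.getElem?_eq_getElem hL2, ← hjdef]
    rfl
  rw [hget2]
  -- both slices are drop (j+1)
  simp only [PySem.Str.slice, PySem.Chars.slice]
  rw [show ((0 : Int) + (j : Int) + 1) = (((j + 1 : Nat)) : Int) by push_cast; ring,
    PySem.List.slice_from_natCast,
    PySem.List.slice_from_neg_natCast _ _ (by omega)]
  congr 1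
  rw [← hl]
  congr 1
  omega
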